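-- pv_equiv track=rewrite | github.com/ugrijaniStr/Chat | crypto.py | decode_crypto_to_message
-- ===== SOURCE A (Python) =====
-- class Crypto():
--     prefix_list = [
--         "FS5ffEseptxmDmP1giC2CKIz0IH2juzzEpLhWokx",
--         "Gzfv3byEZHsdIGybGwL5BrxT72mWWvXlN2Ga5G3c",
--         "XJ2ePH6MEsedFkHNJlhQlVwKGgCYSszsZv2cjEGI",
--         "DDYWZvq0m8VocPSDiTbjAySgiMczmtmBoRW0gcer",
--         "cjs3QxADv8ogzvk8gubK4YNL88TUyT9wuewcjg7m",
--         "kspYBmcVyltca74uxTVVwnmkcglfsaKPJXClq4Qn",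
--         "Xlblzej15ygMzUSIYX5R4ZIAJ9z4m2fmnQx0ZNq5",
--         "bdowD6kEyYTfSNu2J5wVs6dIyVSFIfZ8Yp41PYLE",
--         "dPiZr2tDoZOpyTsRk5NsfKotwcztVd9X4Y9esPif",
--         "6o8Y2C7xsBgwGBjrUE25f9tjwPH1py43b4KaJhcU",
--         "OrxoV76t6eDZqQSfSykn5TznGJj0Uuy8xTB13ASW",
--         "gihvDPCox92u7IzK5I6HTCweTFFTwjRfoYvMeACW",
--         "5WVAFQQdhGJDvFdmuaDyCKvBCsVmDcRIa0KEBqEK",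
--         "MIWcrZmo1ORf0iAxvqlm0IGHvHtjESZ52QYdtvm7",
--         "RZa8jci02cNMWEZBxpWHZWbnyXuV45X0Dudxh5T5",
--         "LNFeLh1h2EW2vC3ELP7LzwvyOVMWEvgviOfhkgro",
--         "WcOgxNSOMDqCKp44bKexgW6ydTubygf5SIuSwWZB",
--         "71MXRNSHIZWphLb2bJAzGscjJhJRkb4YvQCKMQmF",
--         "EVkLQ8hrwpvd7OV1YVNVAD74tBVzf9R9XxDwbRVN",
--         "6T7KHuoOhev2bpo6hJYDjTn2KMwPbihY4GenGQpZ",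
--     ]
--
--     sufix_list = [
--         "PU#X1Z<(5kW^i}ARA3Kd!|IVx5;I4Fr<?v3ej.0&",
--         "M_%%hMj}9JPwq\\Yc.,xaa*/Mm|_61F6;bsYnAG=<",
--         "L6?iv\\&2yX^4a[nq&L@>8Ou,zQh!;i0d@{`+I|`*",
--         ",)4Hh_=hyn'({gPE8fYq2r->&?petlc:C>Ie%!%a",
--         "^rmgU(C%:th@:wzWe#7CLK`4O#iWah~$m(W(VU`&",
--         "mk=#QvnO^5hLCXOZ7[OQC-r-L=mz`7}N7<e2e7r'",
--         ":|@TTp}L@>?[8O:a(&PTG7|1[1g!)`{AjV82K^6Y",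
--         "He-hSfaf?9@5cf~cF;YGb~4Ngk%Nr1.(G3P{DSnB",
--         ".[I}$8![4B4p}q{Ffi&iZ;y_,xZ)ZZ:+!eYN),wX",
--         "@Ysa7_D7iMwl}fAw>l1o[a;gQc)hnB6[gLGve6Y{",
--         "}$mH,p4]k~f%{~R_P;i2R0LzQ<7)jRuvFTk]k}@_",
--         "$V}4w56pP-nruxdQ?g=cmiKLjM5,BPMlc.4c>]e4",
--         "JJ2}T)9*<El=H/q'<%`b?S[]U;/A^.4Ur{-WVu'H",
--         "V!dTl1;T<QA*:md#vF|4'R#l1t^]iUa-<9cOnvVO",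
--         "x]>y)fG4>NkPwIf.z*i9b'l&lnG8{ebLxphuET:k",
--         "3HgP_2Q)Xk'*g65dT^`tIjvf,7+fmx}!:sKjzSLH",
--         "7k-0+qja+<=Rbn@_LvOXt$G2i7hYk+fRm;7=r_J|",
--         ":f!in*S#S.KVYUS+8}z%E2@n@<mH'e(uf+I2L9d_",
--         "N[s=c8\\ZSvLMqzhcEp,iws.PC]k>)6X2E'bUr6Wx",
--         "=yE9Nr(F2)#24Gtxw2V=0^j(Glf3&J?T_hrHt,>j",
--     ]
--
--     crypto_word_list = [
--         'A', '154', 'g', '371', 'S', 'l', 'u', '520', '655', '286',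
--         'v', '515', 'L', '92', '876', 'p', 'Q', 'R', 'q', 'c',
--         'U', 'e', 'o', 'z', 'Z', 'n', '_'
--     ]
--
--     @staticmethod
--     def encode_message_to_crypto_word(message):
--         result = ""
--         for char in message:
--             if char == " ":
--                 result += "_"
--             elif char.isalpha():
--                 index = ord(char.lower()) - ord('a')
--                 if 0 <= index < 26:
--                     result += Crypto.crypto_word_list[index]
--         return result
--
--     @staticmethod
--     def crypto_sys(prefix_message, sufix_message, message):
--         encoded = Crypto.encode_message_to_crypto_word(message)
--         return prefix_message + encoded + sufix_message
--
-- def decode_crypto_to_message(crypto_word_message):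
--     result = ""
--     i = 0
--     crypto_map = {word: chr(97 + idx) for idx, word in enumerate(Crypto.crypto_word_list[:-1])}
--     crypto_map["_"] = " "
--
--     while i < len(crypto_word_message):
--         matched = False
--         for word in sorted(Crypto.crypto_word_list, key=lambda x: -len(x)):
--             if crypto_word_message[i:i+len(word)] == word:
--                 result += crypto_map[word]
--                 i += len(word)
--                 matched = True
--                 break
--         if not matched:
--             i += 1
--     return result
-- ===== SOURCE B (Python) =====
-- _CRYPTO_WORDS = [
--     'A', '154', 'g', '371', 'S', 'l', 'u', '520', '655', '286',
--     'v', '515', 'L', '92', '876', 'p', 'Q', 'R', 'q', 'c',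
--     'U', 'e', 'o', 'z', 'Z', 'n', '_'
-- ]
--
-- # The code words split by character class: every multi-character code is purely numeric,
-- # every single-character code is a non-digit, so the two never compete for a match.
-- _SINGLE = {}
-- _DOUBLE = {}
-- _TRIPLE = {}
-- for _idx, _w in enumerate(_CRYPTO_WORDS):
--     _ch = ' ' if _w == '_' else chr(97 + _idx)
--     if len(_w) == 1:
--         _SINGLE[_w] = _ch
--     elif len(_w) == 2:
--         _DOUBLE[_w] = _ch
--     else:
--         _TRIPLE[_w] = _ch
--
-- def decode_crypto_to_message(crypto_word_message):
--     s = crypto_word_message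
--     n = len(s)
--     out = []
--     i = 0
--     while i < n:
--         if '0' <= s[i] <= '9':
--             # tokenize the maximal digit run, then decode it with the numeric codes
--             j = i
--             while j < n and '0' <= s[j] <= '9':
--                 j += 1
--             while i < j:
--                 trip = s[i:i + 3]
--                 if trip in _TRIPLE:
--                     out.append(_TRIPLE[trip])
--                     i += 3
--                 else:
--                     dub = s[i:i + 2]
--                     if dub in _DOUBLE:
--                         out.append(_DOUBLE[dub])
--                         i += 2
--                     else:
--                         i += 1
--         else:
--             c = _SINGLE.get(s[i])
--             if c is not None:
--                 out.append(c)
--             i += 1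
--     return ''.join(out)
-- ===== Notes on version B (the rewrite author's own statement) =====
-- stated objective: faster
-- what changed: B dispatches each position by character class and tokenizes maximal digit runs: since every multi-character code is purely numeric and every single-character code is a non-digit, non-digit characters are decoded by a single per-char lookup and digit runs are decoded by probing the 3- and 2-digit code tables, instead of A's re-sort and linear scan of all 27 words at every position.
import Mathlib
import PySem

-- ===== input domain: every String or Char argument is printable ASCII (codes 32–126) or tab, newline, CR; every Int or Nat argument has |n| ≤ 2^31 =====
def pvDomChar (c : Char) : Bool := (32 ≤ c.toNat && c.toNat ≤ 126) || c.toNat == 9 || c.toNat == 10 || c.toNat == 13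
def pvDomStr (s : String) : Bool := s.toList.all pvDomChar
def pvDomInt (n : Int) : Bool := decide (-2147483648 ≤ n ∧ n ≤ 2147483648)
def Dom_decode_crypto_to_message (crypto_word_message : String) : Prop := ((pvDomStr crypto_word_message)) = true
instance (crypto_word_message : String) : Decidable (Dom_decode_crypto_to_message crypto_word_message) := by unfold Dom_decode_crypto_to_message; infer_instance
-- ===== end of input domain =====

-- B decodes by character class: every multi-character code word is purely numeric and every
-- single-character code is a non-digit, so B maps non-digit characters with one per-char lookup
-- and decodes maximal digit runs against the 3-/2-digit code tables, instead of A's re-sort and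
-- scan of all 27 words at every position; identical return value.

-- ===== PORT A =====
-- Crypto.crypto_word_list (words as char lists; strings are handled on the List Char side)
def cryptoWordList : List (List Char) :=
  ["A".toList, "154".toList, "g".toList, "371".toList, "S".toList, "l".toList, "u".toList,
   "520".toList, "655".toList, "286".toList, "v".toList, "515".toList, "L".toList, "92".toList,
   "876".toList, "p".toList, "Q".toList, "R".toList, "q".toList, "c".toList, "U".toList,
   "e".toList, "o".toList, "z".toList, "Z".toList, "n".toList, "_".toList]

-- crypto_map = {word: chr(97+idx) for idx, word in enumerate(crypto_word_list[:-1])}; crypto_map["_"] = " "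
def cryptoMapA : PySem.Dict (List Char) Char :=
  ((PySem.List.enumerate (PySem.List.slice cryptoWordList none (some (-1)))).foldl
    (fun d p => d.insert p.2 (Char.ofNat ((97 : Int) + p.1).toNat)) PySem.Dict.empty).insert
    "_".toList ' '

-- sorted(Crypto.crypto_word_list, key=lambda x: -len(x))
def sortedWordsA : List (List Char) :=
  PySem.List.sorted cryptoWordList (fun x => -((x.length : Int))) false

-- the inner 'for word in sorted(...)' loop: first word whose slice matches, with its decoded
-- char (crypto_map[word]; every word is a key, so the getD default is never used) and length
def innerLoopA (s : List Char) (i : Nat) : List (List Char) → Option (Char × Nat)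
  | [] => none
  | w :: ws =>
    if PySem.List.slice s (some (i : Int)) (some ((i : Int) + (w.length : Int))) == w then
      some ((cryptoMapA.get? w).getD ' ', w.length)
    else innerLoopA s i ws

-- the 'while i < len(...)' loop; fuel = remaining iterations (i grows by ≥ 1 each round,
-- so s.length rounds always suffice)
def whileLoopA (s : List Char) : Nat → Nat → List Char → List Char
  | 0, _, result => result
  | fuel + 1, i, result =>
    if i < s.length then
      match innerLoopA s i sortedWordsA with
      | some (c, L) => whileLoopA s fuel (i + L) (result ++ [c])
      | none => whileLoopA s fuel (i + 1) result
    else result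

def decode_crypto_to_message (crypto_word_message : String) : String :=
  String.ofList (whileLoopA crypto_word_message.toList crypto_word_message.toList.length 0 [])

-- ===== PORT B =====
-- Source B's module constants: the same word list, and the three per-length code tables
def cryptoWordsB : List (List Char) :=
  ["A".toList, "154".toList, "g".toList, "371".toList, "S".toList, "l".toList, "u".toList,
   "520".toList, "655".toList, "286".toList, "v".toList, "515".toList, "L".toList, "92".toList,
   "876".toList, "p".toList, "Q".toList, "R".toList, "q".toList, "c".toList, "U".toList,
   "e".toList, "o".toList, "z".toList, "Z".toList, "n".toList, "_".toList]

-- the 'for _idx, _w in enumerate(_CRYPTO_WORDS)' loop filling _SINGLE, _DOUBLE, _TRIPLE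
def buildMapsB :
    PySem.Dict (List Char) Char × PySem.Dict (List Char) Char × PySem.Dict (List Char) Char :=
  (PySem.List.enumerate cryptoWordsB).foldl
    (fun m p =>
      let ch := if p.2 == "_".toList then ' ' else Char.ofNat ((97 : Int) + p.1).toNat
      if p.2.length == 1 then (m.1.insert p.2 ch, m.2.1, m.2.2)
      else if p.2.length == 2 then (m.1, m.2.1.insert p.2 ch, m.2.2)
      else (m.1, m.2.1, m.2.2.insert p.2 ch))
    (PySem.Dict.empty, PySem.Dict.empty, PySem.Dict.empty)

def singleB : PySem.Dict (List Char) Char := buildMapsB.1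
def doubleB : PySem.Dict (List Char) Char := buildMapsB.2.1
def tripleB : PySem.Dict (List Char) Char := buildMapsB.2.2

-- '0' <= c <= '9'
def isDigB (c : Char) : Bool := decide ('0' ≤ c ∧ c ≤ '9')

-- the 'while j < n and digit' scan for the end of the maximal digit run
def runEndB (l : List Char) (j : Nat) : Nat :=
  if h : j < l.length then
    if isDigB l[j] then runEndB l (j + 1) else j
  else j
termination_by l.length - j
decreasing_by omega

-- the 'while i < j' loop decoding one digit run (i is the k here)
def innerB (l : List Char) (j k : Nat) (out : List Char) : List Char :=
  if h : k < j then
    match tripleB.get? (PySem.List.slice l (some (k : Int)) (some ((k : Int) + 3))) with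
    | some c => innerB l j (k + 3) (out ++ [c])
    | none =>
      match doubleB.get? (PySem.List.slice l (some (k : Int)) (some ((k : Int) + 2))) with
      | some c => innerB l j (k + 2) (out ++ [c])
      | none => innerB l j (k + 1) out
  else out
termination_by j - k
decreasing_by all_goals omega

-- runEndB only moves forward (cited by outerB's decreasing_by)
lemma runEndB_ge (l : List Char) (j : Nat) : j ≤ runEndB l j := by
  rw [runEndB]
  split
  · split
    · have ih := runEndB_ge l (j + 1); omega
    · omega
  · omega
termination_by l.length - j
decreasing_by omega

lemma runEndB_gt (l : List Char) (i : Nat) (h : i < l.length) (hd : isDigB (l[i]'h) = true) :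
    i < runEndB l i := by
  rw [runEndB, dif_pos h, if_pos hd]
  have := runEndB_ge l (i + 1); omega

-- the outer 'while i < n' loop of Source B
def outerB (l : List Char) (i : Nat) (out : List Char) : List Char :=
  if h : i < l.length then
    if hd : isDigB l[i] then
      outerB l (runEndB l i) (innerB l (runEndB l i) i out)
    else
      match singleB.get? [l[i]] with
      | some c => outerB l (i + 1) (out ++ [c])
      | none => outerB l (i + 1) out
  else out
termination_by l.length - i
decreasing_by
  · have := runEndB_gt l i h hd; omega
  all_goals omega

def decode_crypto_to_message_alt (crypto_word_message : String) : String :=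
  String.ofList (outerB crypto_word_message.toList 0 [])

-- ===== PRECONDITION & SPEC =====
def Spec_decode_crypto_to_message (crypto_word_message : String) (out : String) : Prop := out = decode_crypto_to_message_alt crypto_word_message
instance (crypto_word_message : String) (out : String) : Decidable (Spec_decode_crypto_to_message crypto_word_message out) := by unfold Spec_decode_crypto_to_message; infer_instance

-- ===== CLAIM (what is proved, stated in full; the proofs are below) =====
def Claim_equal_decode_crypto_to_message : Prop := ∀ (crypto_word_message : String), Dom_decode_crypto_to_message crypto_word_message → Spec_decode_crypto_to_message crypto_word_message (decode_crypto_to_message crypto_word_message)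

-- ===== LEMMAS AND PROOFS =====

-- B's per-position step on a digit run, in terms of drop/take (proof-side view of innerB's body)
def stepD (l : List Char) (i : Nat) : Option (Char × Nat) :=
  match tripleB.get? ((l.drop i).take 3) with
  | some c => some (c, 3)
  | none =>
    match doubleB.get? ((l.drop i).take 2) with
    | some c => some (c, 2)
    | none => none

lemma slice_take (s : List Char) (i L : Nat) :
    PySem.List.slice s (some (i : Int)) (some ((i : Int) + (L : Int))) = (s.drop i).take L :=
  PySem.List.slice_natCast_add s i L

lemma slice_take3 (l : List Char) (k : Nat) :
    PySem.List.slice l (some (k : Int)) (some ((k : Int) + 3)) = (l.drop k).take 3 := by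
  exact_mod_cast slice_take l k 3

lemma slice_take2 (l : List Char) (k : Nat) :
    PySem.List.slice l (some (k : Int)) (some ((k : Int) + 2)) = (l.drop k).take 2 := by
  exact_mod_cast slice_take l k 2

lemma sortedWordsA_eval : sortedWordsA =
  [['1','5','4'], ['3','7','1'], ['5','2','0'], ['6','5','5'], ['2','8','6'], ['5','1','5'],
   ['8','7','6'], ['9','2'], ['A'], ['g'], ['S'], ['l'], ['u'], ['v'], ['L'],
   ['p'], ['Q'], ['R'], ['q'], ['c'], ['U'], ['e'], ['o'], ['z'], ['Z'], ['n'], ['_']] := by decide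

lemma mapA_eval : cryptoMapA = PySem.Dict.mk
  [(['A'],'a'), (['1','5','4'],'b'), (['g'],'c'), (['3','7','1'],'d'), (['S'],'e'), (['l'],'f'),
   (['u'],'g'), (['5','2','0'],'h'), (['6','5','5'],'i'), (['2','8','6'],'j'), (['v'],'k'),
   (['5','1','5'],'l'), (['L'],'m'), (['9','2'],'n'), (['8','7','6'],'o'), (['p'],'p'),
   (['Q'],'q'), (['R'],'r'), (['q'],'s'), (['c'],'t'), (['U'],'u'), (['e'],'v'), (['o'],'w'),
   (['z'],'x'), (['Z'],'y'), (['n'],'z'), (['_'],' ')] := by decide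

lemma singleB_eval : singleB = PySem.Dict.mk
  [(['A'],'a'), (['g'],'c'), (['S'],'e'), (['l'],'f'), (['u'],'g'), (['v'],'k'), (['L'],'m'),
   (['p'],'p'), (['Q'],'q'), (['R'],'r'), (['q'],'s'), (['c'],'t'), (['U'],'u'), (['e'],'v'),
   (['o'],'w'), (['z'],'x'), (['Z'],'y'), (['n'],'z'), (['_'],' ')] := by decide

lemma doubleB_eval : doubleB = PySem.Dict.mk [(['9','2'],'n')] := by decide

lemma tripleB_eval : tripleB = PySem.Dict.mk
  [(['1','5','4'],'b'), (['3','7','1'],'d'), (['5','2','0'],'h'), (['6','5','5'],'i'),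
   (['2','8','6'],'j'), (['5','1','5'],'l'), (['8','7','6'],'o')] := by decide
lemma slice_take1 (l : List Char) (k : Nat) :
    PySem.List.slice l (some (k : Int)) (some ((k : Int) + 1)) = (l.drop k).take 1 := by
  exact_mod_cast slice_take l k 1

lemma drop_cons_facts (l : List Char) (i : Nat) (a : Char) (r : List Char)
    (hr : l.drop i = a :: r) : ∃ h : i < l.length, l[i] = a ∧ l.drop (i + 1) = r := by
  have hlen : i < l.length := by
    by_contra h
    rw [List.drop_eq_nil_of_le (by omega)] at hr
    simp at hr
  have h2 := List.drop_eq_getElem_cons hlen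
  rw [hr] at h2
  injection h2 with ha hb
  exact ⟨hlen, ha.symm, hb.symm⟩

lemma runEndB_succ_of (l : List Char) (i : Nat) (h : i < l.length)
    (hd : isDigB (l[i]'h) = true) : runEndB l i = runEndB l (i + 1) := by
  conv_lhs => rw [runEndB]
  rw [dif_pos h, if_pos hd]

lemma stepD_run (l : List Char) (i : Nat) (c : Char) (L : Nat)
    (hs : stepD l i = some (c, L)) :
    runEndB l (i + L) = runEndB l i ∧ 2 ≤ L := by
  unfold stepD at hs
  rcases hr : l.drop i with _ | ⟨a, r1⟩
  · rw [hr] at hs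
    simp [tripleB_eval, doubleB_eval, PySem.Dict.get?, PySem.Dict.get?_mk_cons] at hs
  · rcases r1 with _ | ⟨b, r2⟩
    · rw [hr] at hs
      simp [tripleB_eval, doubleB_eval, PySem.Dict.get?, PySem.Dict.get?_mk_cons] at hs
    · rcases r2 with _ | ⟨d, r⟩
      · -- l.drop i = [a, b]
        rw [hr] at hs
        by_cases h92 : a = '9' ∧ b = '2'
        · obtain ⟨rfl, rfl⟩ := h92
          simp [tripleB_eval, doubleB_eval, PySem.Dict.get?, PySem.Dict.get?_mk_cons] at hs
          obtain ⟨rfl, rfl⟩ := hs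
          obtain ⟨h0, ha, hr1⟩ := drop_cons_facts l i '9' _ hr
          obtain ⟨h1, hb, _⟩ := drop_cons_facts l (i + 1) '2' _ hr1
          refine ⟨?_, by omega⟩
          rw [runEndB_succ_of l i h0 (by rw [ha]; decide),
              runEndB_succ_of l (i + 1) h1 (by rw [hb]; decide)]
        · have h92' : ¬ ('9' = a ∧ '2' = b) := fun ⟨p, q⟩ => h92 ⟨p.symm, q.symm⟩
          simp [tripleB_eval, doubleB_eval, PySem.Dict.get?, PySem.Dict.get?_mk_cons, h92, h92'] at hs
      · -- l.drop i = a :: b :: d :: r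
        rw [hr] at hs
        by_cases t0 : a = '1' ∧ b = '5' ∧ d = '4'
        · obtain ⟨rfl, rfl, rfl⟩ := t0
          simp [tripleB_eval, doubleB_eval, PySem.Dict.get?, PySem.Dict.get?_mk_cons] at hs
          obtain ⟨rfl, rfl⟩ := hs
          obtain ⟨h0, ha, hr1⟩ := drop_cons_facts l i '1' _ hr
          obtain ⟨h1, hb, hr2⟩ := drop_cons_facts l (i + 1) '5' _ hr1
          obtain ⟨h2, hc, _⟩ := drop_cons_facts l (i + 2) '4' _ hr2
          refine ⟨?_, by omega⟩
          rw [runEndB_succ_of l i h0 (by rw [ha]; decide),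
              runEndB_succ_of l (i + 1) h1 (by rw [hb]; decide),
              runEndB_succ_of l (i + 2) h2 (by rw [hc]; decide)]
        have t0' : ¬ ('1' = a ∧ '5' = b ∧ '4' = d) := fun ⟨p, q, w⟩ => t0 ⟨p.symm, q.symm, w.symm⟩
        by_cases t1 : a = '3' ∧ b = '7' ∧ d = '1'
        · obtain ⟨rfl, rfl, rfl⟩ := t1
          simp [tripleB_eval, doubleB_eval, PySem.Dict.get?, PySem.Dict.get?_mk_cons] at hs
          obtain ⟨rfl, rfl⟩ := hs
          obtain ⟨h0, ha, hr1⟩ := drop_cons_facts l i '3' _ hr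
          obtain ⟨h1, hb, hr2⟩ := drop_cons_facts l (i + 1) '7' _ hr1
          obtain ⟨h2, hc, _⟩ := drop_cons_facts l (i + 2) '1' _ hr2
          refine ⟨?_, by omega⟩
          rw [runEndB_succ_of l i h0 (by rw [ha]; decide),
              runEndB_succ_of l (i + 1) h1 (by rw [hb]; decide),
              runEndB_succ_of l (i + 2) h2 (by rw [hc]; decide)]
        have t1' : ¬ ('3' = a ∧ '7' = b ∧ '1' = d) := fun ⟨p, q, w⟩ => t1 ⟨p.symm, q.symm, w.symm⟩
        by_cases t2 : a = '5' ∧ b = '2' ∧ d = '0'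
        · obtain ⟨rfl, rfl, rfl⟩ := t2
          simp [tripleB_eval, doubleB_eval, PySem.Dict.get?, PySem.Dict.get?_mk_cons] at hs
          obtain ⟨rfl, rfl⟩ := hs
          obtain ⟨h0, ha, hr1⟩ := drop_cons_facts l i '5' _ hr
          obtain ⟨h1, hb, hr2⟩ := drop_cons_facts l (i + 1) '2' _ hr1
          obtain ⟨h2, hc, _⟩ := drop_cons_facts l (i + 2) '0' _ hr2
          refine ⟨?_, by omega⟩
          rw [runEndB_succ_of l i h0 (by rw [ha]; decide),
              runEndB_succ_of l (i + 1) h1 (by rw [hb]; decide),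
              runEndB_succ_of l (i + 2) h2 (by rw [hc]; decide)]
        have t2' : ¬ ('5' = a ∧ '2' = b ∧ '0' = d) := fun ⟨p, q, w⟩ => t2 ⟨p.symm, q.symm, w.symm⟩
        by_cases t3 : a = '6' ∧ b = '5' ∧ d = '5'
        · obtain ⟨rfl, rfl, rfl⟩ := t3
          simp [tripleB_eval, doubleB_eval, PySem.Dict.get?, PySem.Dict.get?_mk_cons] at hs
          obtain ⟨rfl, rfl⟩ := hs
          obtain ⟨h0, ha, hr1⟩ := drop_cons_facts l i '6' _ hr
          obtain ⟨h1, hb, hr2⟩ := drop_cons_facts l (i + 1) '5' _ hr1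
          obtain ⟨h2, hc, _⟩ := drop_cons_facts l (i + 2) '5' _ hr2
          refine ⟨?_, by omega⟩
          rw [runEndB_succ_of l i h0 (by rw [ha]; decide),
              runEndB_succ_of l (i + 1) h1 (by rw [hb]; decide),
              runEndB_succ_of l (i + 2) h2 (by rw [hc]; decide)]
        have t3' : ¬ ('6' = a ∧ '5' = b ∧ '5' = d) := fun ⟨p, q, w⟩ => t3 ⟨p.symm, q.symm, w.symm⟩
        by_cases t4 : a = '2' ∧ b = '8' ∧ d = '6'
        · obtain ⟨rfl, rfl, rfl⟩ := t4
          simp [tripleB_eval, doubleB_eval, PySem.Dict.get?, PySem.Dict.get?_mk_cons] at hs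
          obtain ⟨rfl, rfl⟩ := hs
          obtain ⟨h0, ha, hr1⟩ := drop_cons_facts l i '2' _ hr
          obtain ⟨h1, hb, hr2⟩ := drop_cons_facts l (i + 1) '8' _ hr1
          obtain ⟨h2, hc, _⟩ := drop_cons_facts l (i + 2) '6' _ hr2
          refine ⟨?_, by omega⟩
          rw [runEndB_succ_of l i h0 (by rw [ha]; decide),
              runEndB_succ_of l (i + 1) h1 (by rw [hb]; decide),
              runEndB_succ_of l (i + 2) h2 (by rw [hc]; decide)]
        have t4' : ¬ ('2' = a ∧ '8' = b ∧ '6' = d) := fun ⟨p, q, w⟩ => t4 ⟨p.symm, q.symm, w.symm⟩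
        by_cases t5 : a = '5' ∧ b = '1' ∧ d = '5'
        · obtain ⟨rfl, rfl, rfl⟩ := t5
          simp [tripleB_eval, doubleB_eval, PySem.Dict.get?, PySem.Dict.get?_mk_cons] at hs
          obtain ⟨rfl, rfl⟩ := hs
          obtain ⟨h0, ha, hr1⟩ := drop_cons_facts l i '5' _ hr
          obtain ⟨h1, hb, hr2⟩ := drop_cons_facts l (i + 1) '1' _ hr1
          obtain ⟨h2, hc, _⟩ := drop_cons_facts l (i + 2) '5' _ hr2
          refine ⟨?_, by omega⟩
          rw [runEndB_succ_of l i h0 (by rw [ha]; decide),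
              runEndB_succ_of l (i + 1) h1 (by rw [hb]; decide),
              runEndB_succ_of l (i + 2) h2 (by rw [hc]; decide)]
        have t5' : ¬ ('5' = a ∧ '1' = b ∧ '5' = d) := fun ⟨p, q, w⟩ => t5 ⟨p.symm, q.symm, w.symm⟩
        by_cases t6 : a = '8' ∧ b = '7' ∧ d = '6'
        · obtain ⟨rfl, rfl, rfl⟩ := t6
          simp [tripleB_eval, doubleB_eval, PySem.Dict.get?, PySem.Dict.get?_mk_cons] at hs
          obtain ⟨rfl, rfl⟩ := hs
          obtain ⟨h0, ha, hr1⟩ := drop_cons_facts l i '8' _ hr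
          obtain ⟨h1, hb, hr2⟩ := drop_cons_facts l (i + 1) '7' _ hr1
          obtain ⟨h2, hc, _⟩ := drop_cons_facts l (i + 2) '6' _ hr2
          refine ⟨?_, by omega⟩
          rw [runEndB_succ_of l i h0 (by rw [ha]; decide),
              runEndB_succ_of l (i + 1) h1 (by rw [hb]; decide),
              runEndB_succ_of l (i + 2) h2 (by rw [hc]; decide)]
        have t6' : ¬ ('8' = a ∧ '7' = b ∧ '6' = d) := fun ⟨p, q, w⟩ => t6 ⟨p.symm, q.symm, w.symm⟩
        by_cases h92 : a = '9' ∧ b = '2'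
        · obtain ⟨rfl, rfl⟩ := h92
          simp [tripleB_eval, doubleB_eval, PySem.Dict.get?, PySem.Dict.get?_mk_cons] at hs
          obtain ⟨rfl, rfl⟩ := hs
          obtain ⟨h0, ha, hr1⟩ := drop_cons_facts l i '9' _ hr
          obtain ⟨h1, hb, _⟩ := drop_cons_facts l (i + 1) '2' _ hr1
          refine ⟨?_, by omega⟩
          rw [runEndB_succ_of l i h0 (by rw [ha]; decide),
              runEndB_succ_of l (i + 1) h1 (by rw [hb]; decide)]
        have h92' : ¬ ('9' = a ∧ '2' = b) := fun ⟨p, q⟩ => h92 ⟨p.symm, q.symm⟩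
        simp [tripleB_eval, doubleB_eval, PySem.Dict.get?, PySem.Dict.get?_mk_cons, t0, t0', t1, t1', t2, t2', t3, t3', t4, t4', t5, t5', t6, t6', h92, h92'] at hs

lemma stepA_digit (l : List Char) (i : Nat) (a : Char) (r : List Char)
    (hr : l.drop i = a :: r) (hd : isDigB a = true) :
    innerLoopA l i sortedWordsA = stepD l i := by
  have hda : '0' ≤ a ∧ a ≤ '9' := by simpa [isDigB] using hd
  have s0 : a ≠ 'A' := by rintro rfl; revert hda; decide
  have s1 : a ≠ 'g' := by rintro rfl; revert hda; decide
  have s2 : a ≠ 'S' := by rintro rfl; revert hda; decide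
  have s3 : a ≠ 'l' := by rintro rfl; revert hda; decide
  have s4 : a ≠ 'u' := by rintro rfl; revert hda; decide
  have s5 : a ≠ 'v' := by rintro rfl; revert hda; decide
  have s6 : a ≠ 'L' := by rintro rfl; revert hda; decide
  have s7 : a ≠ 'p' := by rintro rfl; revert hda; decide
  have s8 : a ≠ 'Q' := by rintro rfl; revert hda; decide
  have s9 : a ≠ 'R' := by rintro rfl; revert hda; decide
  have s10 : a ≠ 'q' := by rintro rfl; revert hda; decide
  have s11 : a ≠ 'c' := by rintro rfl; revert hda; decide
  have s12 : a ≠ 'U' := by rintro rfl; revert hda; decide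
  have s13 : a ≠ 'e' := by rintro rfl; revert hda; decide
  have s14 : a ≠ 'o' := by rintro rfl; revert hda; decide
  have s15 : a ≠ 'z' := by rintro rfl; revert hda; decide
  have s16 : a ≠ 'Z' := by rintro rfl; revert hda; decide
  have s17 : a ≠ 'n' := by rintro rfl; revert hda; decide
  have s18 : a ≠ '\u005f' := by rintro rfl; revert hda; decide
  rw [sortedWordsA_eval]
  rcases r with _ | ⟨b, r1⟩
  · simp [innerLoopA, stepD, slice_take, slice_take3, slice_take2, slice_take1, hr, mapA_eval, tripleB_eval, doubleB_eval, PySem.Dict.get?, PySem.Dict.get?_mk_cons, s0, Ne.symm s0, s1, Ne.symm s1, s2, Ne.symm s2, s3, Ne.symm s3, s4, Ne.symm s4, s5, Ne.symm s5, s6, Ne.symm s6, s7, Ne.symm s7, s8, Ne.symm s8, s9, Ne.symm s9, s10, Ne.symm s10, s11, Ne.symm s11, s12, Ne.symm s12, s13, Ne.symm s13, s14, Ne.symm s14, s15, Ne.symm s15, s16, Ne.symm s16, s17, Ne.symm s17, s18, Ne.symm s18]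
  · rcases r1 with _ | ⟨c, r2⟩
    · by_cases h92 : a = '9' ∧ b = '2'
      · obtain ⟨rfl, rfl⟩ := h92
        simp [innerLoopA, stepD, slice_take, slice_take3, slice_take2, slice_take1, hr, mapA_eval, tripleB_eval, doubleB_eval, PySem.Dict.get?, PySem.Dict.get?_mk_cons]
      · have h92' : ¬ ('9' = a ∧ '2' = b) := fun ⟨p, q⟩ => h92 ⟨p.symm, q.symm⟩
        simp [innerLoopA, stepD, slice_take, slice_take3, slice_take2, slice_take1, hr, mapA_eval, tripleB_eval, doubleB_eval, PySem.Dict.get?, PySem.Dict.get?_mk_cons, h92, h92', s0, Ne.symm s0, s1, Ne.symm s1, s2, Ne.symm s2, s3, Ne.symm s3, s4, Ne.symm s4, s5, Ne.symm s5, s6, Ne.symm s6, s7, Ne.symm s7, s8, Ne.symm s8, s9, Ne.symm s9, s10, Ne.symm s10, s11, Ne.symm s11, s12, Ne.symm s12, s13, Ne.symm s13, s14, Ne.symm s14, s15, Ne.symm s15, s16, Ne.symm s16, s17, Ne.symm s17, s18, Ne.symm s18]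
    · 
      by_cases t0 : a = '1' ∧ b = '5' ∧ c = '4'
      · obtain ⟨rfl, rfl, rfl⟩ := t0
        simp [innerLoopA, stepD, slice_take, slice_take3, slice_take2, slice_take1, hr, mapA_eval, tripleB_eval, doubleB_eval, PySem.Dict.get?, PySem.Dict.get?_mk_cons]
      have t0' : ¬ ('1' = a ∧ '5' = b ∧ '4' = c) := fun ⟨p, q, w⟩ => t0 ⟨p.symm, q.symm, w.symm⟩
      by_cases t1 : a = '3' ∧ b = '7' ∧ c = '1'
      · obtain ⟨rfl, rfl, rfl⟩ := t1
        simp [innerLoopA, stepD, slice_take, slice_take3, slice_take2, slice_take1, hr, mapA_eval, tripleB_eval, doubleB_eval, PySem.Dict.get?, PySem.Dict.get?_mk_cons]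
      have t1' : ¬ ('3' = a ∧ '7' = b ∧ '1' = c) := fun ⟨p, q, w⟩ => t1 ⟨p.symm, q.symm, w.symm⟩
      by_cases t2 : a = '5' ∧ b = '2' ∧ c = '0'
      · obtain ⟨rfl, rfl, rfl⟩ := t2
        simp [innerLoopA, stepD, slice_take, slice_take3, slice_take2, slice_take1, hr, mapA_eval, tripleB_eval, doubleB_eval, PySem.Dict.get?, PySem.Dict.get?_mk_cons]
      have t2' : ¬ ('5' = a ∧ '2' = b ∧ '0' = c) := fun ⟨p, q, w⟩ => t2 ⟨p.symm, q.symm, w.symm⟩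
      by_cases t3 : a = '6' ∧ b = '5' ∧ c = '5'
      · obtain ⟨rfl, rfl, rfl⟩ := t3
        simp [innerLoopA, stepD, slice_take, slice_take3, slice_take2, slice_take1, hr, mapA_eval, tripleB_eval, doubleB_eval, PySem.Dict.get?, PySem.Dict.get?_mk_cons]
      have t3' : ¬ ('6' = a ∧ '5' = b ∧ '5' = c) := fun ⟨p, q, w⟩ => t3 ⟨p.symm, q.symm, w.symm⟩
      by_cases t4 : a = '2' ∧ b = '8' ∧ c = '6'
      · obtain ⟨rfl, rfl, rfl⟩ := t4
        simp [innerLoopA, stepD, slice_take, slice_take3, slice_take2, slice_take1, hr, mapA_eval, tripleB_eval, doubleB_eval, PySem.Dict.get?, PySem.Dict.get?_mk_cons]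
      have t4' : ¬ ('2' = a ∧ '8' = b ∧ '6' = c) := fun ⟨p, q, w⟩ => t4 ⟨p.symm, q.symm, w.symm⟩
      by_cases t5 : a = '5' ∧ b = '1' ∧ c = '5'
      · obtain ⟨rfl, rfl, rfl⟩ := t5
        simp [innerLoopA, stepD, slice_take, slice_take3, slice_take2, slice_take1, hr, mapA_eval, tripleB_eval, doubleB_eval, PySem.Dict.get?, PySem.Dict.get?_mk_cons]
      have t5' : ¬ ('5' = a ∧ '1' = b ∧ '5' = c) := fun ⟨p, q, w⟩ => t5 ⟨p.symm, q.symm, w.symm⟩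
      by_cases t6 : a = '8' ∧ b = '7' ∧ c = '6'
      · obtain ⟨rfl, rfl, rfl⟩ := t6
        simp [innerLoopA, stepD, slice_take, slice_take3, slice_take2, slice_take1, hr, mapA_eval, tripleB_eval, doubleB_eval, PySem.Dict.get?, PySem.Dict.get?_mk_cons]
      have t6' : ¬ ('8' = a ∧ '7' = b ∧ '6' = c) := fun ⟨p, q, w⟩ => t6 ⟨p.symm, q.symm, w.symm⟩
      by_cases h92 : a = '9' ∧ b = '2'
      · obtain ⟨rfl, rfl⟩ := h92
        simp [innerLoopA, stepD, slice_take, slice_take3, slice_take2, slice_take1, hr, mapA_eval, tripleB_eval, doubleB_eval, PySem.Dict.get?, PySem.Dict.get?_mk_cons]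
      have h92' : ¬ ('9' = a ∧ '2' = b) := fun ⟨p, q⟩ => h92 ⟨p.symm, q.symm⟩
      simp [innerLoopA, stepD, slice_take, slice_take3, slice_take2, slice_take1, hr, mapA_eval, tripleB_eval, doubleB_eval, PySem.Dict.get?, PySem.Dict.get?_mk_cons, t0, t0', t1, t1', t2, t2', t3, t3', t4, t4', t5, t5', t6, t6', h92, h92', s0, Ne.symm s0, s1, Ne.symm s1, s2, Ne.symm s2, s3, Ne.symm s3, s4, Ne.symm s4, s5, Ne.symm s5, s6, Ne.symm s6, s7, Ne.symm s7, s8, Ne.symm s8, s9, Ne.symm s9, s10, Ne.symm s10, s11, Ne.symm s11, s12, Ne.symm s12, s13, Ne.symm s13, s14, Ne.symm s14, s15, Ne.symm s15, s16, Ne.symm s16, s17, Ne.symm s17, s18, Ne.symm s18]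

lemma stepA_nondigit (l : List Char) (i : Nat) (a : Char) (r : List Char)
    (hr : l.drop i = a :: r) (hd : isDigB a = false) :
    innerLoopA l i sortedWordsA = (singleB.get? [a]).map (fun c => (c, 1)) := by
  have hnd : ¬ ('0' ≤ a ∧ a ≤ '9') := by simpa [isDigB] using hd
  have hd1 : a ≠ '1' := by rintro rfl; exact hnd (by decide)
  have hd3 : a ≠ '3' := by rintro rfl; exact hnd (by decide)
  have hd5 : a ≠ '5' := by rintro rfl; exact hnd (by decide)
  have hd6 : a ≠ '6' := by rintro rfl; exact hnd (by decide)
  have hd2 : a ≠ '2' := by rintro rfl; exact hnd (by decide)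
  have hd8 : a ≠ '8' := by rintro rfl; exact hnd (by decide)
  have hd9 : a ≠ '9' := by rintro rfl; exact hnd (by decide)
  rw [sortedWordsA_eval]
  simp only [innerLoopA, List.length_cons, List.length_nil, slice_take, hr]
  by_cases k0 : a = 'A'
  · subst k0; simp [mapA_eval, singleB_eval, PySem.Dict.get?_mk_cons]
  · 
    by_cases k1 : a = 'g'
    · subst k1; simp [mapA_eval, singleB_eval, PySem.Dict.get?_mk_cons]
    · 
      by_cases k2 : a = 'S'
      · subst k2; simp [mapA_eval, singleB_eval, PySem.Dict.get?_mk_cons]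
      · 
        by_cases k3 : a = 'l'
        · subst k3; simp [mapA_eval, singleB_eval, PySem.Dict.get?_mk_cons]
        · 
          by_cases k4 : a = 'u'
          · subst k4; simp [mapA_eval, singleB_eval, PySem.Dict.get?_mk_cons]
          · 
            by_cases k5 : a = 'v'
            · subst k5; simp [mapA_eval, singleB_eval, PySem.Dict.get?_mk_cons]
            · 
              by_cases k6 : a = 'L'
              · subst k6; simp [mapA_eval, singleB_eval, PySem.Dict.get?_mk_cons]
              · 
                by_cases k7 : a = 'p'
                · subst k7; simp [mapA_eval, singleB_eval, PySem.Dict.get?_mk_cons]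
                · 
                  by_cases k8 : a = 'Q'
                  · subst k8; simp [mapA_eval, singleB_eval, PySem.Dict.get?_mk_cons]
                  · 
                    by_cases k9 : a = 'R'
                    · subst k9; simp [mapA_eval, singleB_eval, PySem.Dict.get?_mk_cons]
                    · 
                      by_cases k10 : a = 'q'
                      · subst k10; simp [mapA_eval, singleB_eval, PySem.Dict.get?_mk_cons]
                      · 
                        by_cases k11 : a = 'c'
                        · subst k11; simp [mapA_eval, singleB_eval, PySem.Dict.get?_mk_cons]
                        · 
                          by_cases k12 : a = 'U'
                          · subst k12; simp [mapA_eval, singleB_eval, PySem.Dict.get?_mk_cons]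
                          · 
                            by_cases k13 : a = 'e'
                            · subst k13; simp [mapA_eval, singleB_eval, PySem.Dict.get?_mk_cons]
                            · 
                              by_cases k14 : a = 'o'
                              · subst k14; simp [mapA_eval, singleB_eval, PySem.Dict.get?_mk_cons]
                              · 
                                by_cases k15 : a = 'z'
                                · subst k15; simp [mapA_eval, singleB_eval, PySem.Dict.get?_mk_cons]
                                · 
                                  by_cases k16 : a = 'Z'
                                  · subst k16; simp [mapA_eval, singleB_eval, PySem.Dict.get?_mk_cons]
                                  · 
                                    by_cases k17 : a = 'n'
                                    · subst k17; simp [mapA_eval, singleB_eval, PySem.Dict.get?_mk_cons]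
                                    · 
                                      by_cases k18 : a = '\u005f'
                                      · subst k18; simp [mapA_eval, singleB_eval, PySem.Dict.get?_mk_cons]
                                      · 
                                        simp [PySem.Dict.get?, mapA_eval, singleB_eval, PySem.Dict.get?_mk_cons, hd1, hd3, hd5, hd6, hd2, hd8, hd9, k0, Ne.symm k0, k1, Ne.symm k1, k2, Ne.symm k2, k3, Ne.symm k3, k4, Ne.symm k4, k5, Ne.symm k5, k6, Ne.symm k6, k7, Ne.symm k7, k8, Ne.symm k8, k9, Ne.symm k9, k10, Ne.symm k10, k11, Ne.symm k11, k12, Ne.symm k12, k13, Ne.symm k13, k14, Ne.symm k14, k15, Ne.symm k15, k16, Ne.symm k16, k17, Ne.symm k17, k18, Ne.symm k18]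

lemma innerB_exit (l : List Char) (j k : Nat) (out : List Char) (h : ¬ k < j) :
    innerB l j k out = out := by
  rw [innerB, dif_neg h]

lemma innerB_step (l : List Char) (j k : Nat) (out : List Char) (h : k < j) :
    innerB l j k out =
      match stepD l k with
      | some (c, L) => innerB l j (k + L) (out ++ [c])
      | none => innerB l j (k + 1) out := by
  rw [innerB, dif_pos h]
  unfold stepD
  rw [slice_take3, slice_take2]
  rcases tripleB.get? ((l.drop k).take 3) with _ | c
  · rcases doubleB.get? ((l.drop k).take 2) with _ | c <;> rfl
  · rfl

lemma runEndB_exit (l : List Char) (k : Nat) (h : ¬ (∃ hk : k < l.length, isDigB (l[k]'hk) = true)) :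
    runEndB l k = k := by
  rw [runEndB]
  split
  · rename_i hk
    rw [if_neg (fun hd => h ⟨hk, hd⟩)]
  · rfl

lemma B_reenter (l : List Char) (k : Nat) (out : List Char) :
    outerB l (runEndB l k) (innerB l (runEndB l k) k out) = outerB l k out := by
  by_cases hk : k < runEndB l k
  · have hke : ∃ hk' : k < l.length, isDigB (l[k]'hk') = true := by
      by_contra h
      rw [runEndB_exit l k h] at hk
      omega
    obtain ⟨hk', hd⟩ := hke
    conv_rhs => rw [outerB]
    rw [dif_pos hk', dif_pos hd]
  · have hk2 : runEndB l k = k := by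
      have := runEndB_ge l k
      omega
    rw [hk2, innerB_exit l k k out (by omega)]

lemma loop_eq (l : List Char) : ∀ (fuel i : Nat) (out : List Char),
    l.length - i ≤ fuel → whileLoopA l fuel i out = outerB l i out := by
  intro fuel
  induction fuel with
  | zero =>
    intro i out hf
    have h : ¬ i < l.length := by omega
    rw [outerB, dif_neg h]
    rfl
  | succ n ih =>
    intro i out hf
    by_cases h : i < l.length
    · have hr0 : l.drop i = l[i] :: l.drop (i + 1) := List.drop_eq_getElem_cons h
      by_cases hd : isDigB (l[i]'h) = true
      · rw [whileLoopA, if_pos h, stepA_digit l i l[i] (l.drop (i + 1)) hr0 hd]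
        have hgt : i < runEndB l i := runEndB_gt l i h hd
        conv_rhs => rw [outerB]
        rw [dif_pos h, dif_pos hd, innerB_step l (runEndB l i) i out hgt]
        cases hs : stepD l i with
        | none =>
          dsimp only
          rw [runEndB_succ_of l i h hd, B_reenter l (i + 1) out]
          exact ih (i + 1) out (by omega)
        | some p =>
          obtain ⟨c, L⟩ := p
          obtain ⟨hadv, hL⟩ := stepD_run l i c L hs
          dsimp only
          rw [← hadv, B_reenter l (i + L) (out ++ [c])]
          exact ih (i + L) (out ++ [c]) (by omega)
      · rw [whileLoopA, if_pos h,
          stepA_nondigit l i l[i] (l.drop (i + 1)) hr0 (by simpa using hd)]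
        conv_rhs => rw [outerB]
        rw [dif_pos h, dif_neg hd]
        cases hs : singleB.get? [l[i]] with
        | none =>
          simp only [Option.map_none]
          exact ih (i + 1) out (by omega)
        | some c =>
          simp only [Option.map_some]
          exact ih (i + 1) (out ++ [c]) (by omega)
    · rw [whileLoopA, if_neg h, outerB, dif_neg h]

-- ===== VERDICT (by name: the statement is the Claim_ definition above) =====
theorem decode_crypto_to_message_spec : Claim_equal_decode_crypto_to_message := by
  intro m _
  show _ = _
  unfold decode_crypto_to_message decode_crypto_to_message_alt
  rw [loop_eq m.toList m.toList.length 0 [] (by omega)]
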